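-- pv_equiv track=rewrite | github.com/peterhan91/CXR_Agent | scripts/prepare_mimic_studies.py | _last_substring_index
-- ===== SOURCE A (Python) =====
-- def _last_substring_index(larger_string, substring):
--     """Find the last occurrence of substring in larger_string."""
--     last_index = -1
--     while True:
--         index = larger_string.find(substring, last_index + 1)
--         if index == -1:
--             break
--         last_index = index
--     return last_index
-- ===== SOURCE B (Python) =====
-- def _last_substring_index(larger_string, substring):
--     """Find the last occurrence of substring in larger_string."""
--     m = len(substring)
--     for i in range(len(larger_string) - m, -1, -1):
--         if larger_string[i:i + m] == substring:
--             return i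
--     return -1
-- ===== Notes on version B (the rewrite author's own statement) =====
-- stated objective: alternative
-- what changed: B scans candidate start positions backward from len(s)-len(sub) and compares the slice at each position directly, returning at the first (rightmost) match, instead of A's forward loop of repeated str.find calls that walks through every occurrence.
import Mathlib
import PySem

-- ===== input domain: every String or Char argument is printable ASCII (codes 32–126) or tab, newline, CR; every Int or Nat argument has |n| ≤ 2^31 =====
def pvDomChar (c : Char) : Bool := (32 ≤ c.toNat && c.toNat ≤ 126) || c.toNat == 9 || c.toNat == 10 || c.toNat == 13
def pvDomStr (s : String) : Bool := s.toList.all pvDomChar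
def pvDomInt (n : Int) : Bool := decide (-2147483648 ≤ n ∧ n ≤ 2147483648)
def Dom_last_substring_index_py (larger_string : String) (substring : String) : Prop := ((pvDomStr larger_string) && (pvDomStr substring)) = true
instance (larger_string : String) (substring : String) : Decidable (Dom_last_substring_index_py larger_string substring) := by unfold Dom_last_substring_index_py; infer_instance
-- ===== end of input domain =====

-- B replaces A's forward loop of repeated str.find calls by a backward scan of start
-- positions that compares the slice at each position and stops at the first (rightmost) match.

-- ===== PORT A =====
-- A's `while True` loop: last_index strictly increases each iteration and never exceeds
-- len(larger_string), so length+2 fuel always suffices (the fuel-0 branch is unreachable).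
def lsiGo (larger_string : String) (substring : String) (last_index : Int) : Nat → Int
  | 0 => last_index
  | fuel + 1 =>
    let index := PySem.Str.findFrom larger_string substring (last_index + 1)
    if index = -1 then last_index else lsiGo larger_string substring index fuel

def last_substring_index_py (larger_string : String) (substring : String) : Int :=
  lsiGo larger_string substring (-1) (larger_string.toList.length + 2)

-- ===== PORT B =====
-- for i in range(len(s) - m, -1, -1): if s[i:i+m] == sub: return i;  return -1
def altGo (s : List Char) (sub : List Char) (i : Nat) : Int :=
  if PySem.List.slice s (some (i : Int)) (some ((i : Int) + (sub.length : Int))) = sub then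
    (i : Int)
  else
    match i with
    | 0 => -1
    | i' + 1 => altGo s sub i'

def last_substring_index_py_alt (larger_string : String) (substring : String) : Int :=
  let s := larger_string.toList
  let sub := substring.toList
  if sub.length ≤ s.length then altGo s sub (s.length - sub.length) else -1

-- ===== PRECONDITION & SPEC =====
def Spec_last_substring_index_py (larger_string : String) (substring : String) (out : Int) : Prop := out = last_substring_index_py_alt larger_string substring
instance (larger_string : String) (substring : String) (out : Int) : Decidable (Spec_last_substring_index_py larger_string substring out) := by unfold Spec_last_substring_index_py; infer_instance

-- ===== CLAIM (what is proved, stated in full; the proofs are below) =====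
def Claim_equal_last_substring_index_py : Prop := ∀ (larger_string : String) (substring : String), Dom_last_substring_index_py larger_string substring → Spec_last_substring_index_py larger_string substring (last_substring_index_py larger_string substring)

-- ===== LEMMAS AND PROOFS =====

-- "the result is the last occurrence (as Python counts them), or -1 if none ≤ n"
def LastOccSpec (s sub : List Char) (r : Int) : Prop :=
  (r = -1 ∧ ∀ j ≤ s.length, ¬ sub <+: s.drop j) ∨
  (∃ rn : Nat, r = (rn : Int) ∧ rn ≤ s.length ∧ sub <+: s.drop rn ∧
     ∀ j ≤ s.length, sub <+: s.drop j → j ≤ rn)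

theorem lastOccSpec_unique {s sub : List Char} {r₁ r₂ : Int}
    (h₁ : LastOccSpec s sub r₁) (h₂ : LastOccSpec s sub r₂) : r₁ = r₂ := by
  rcases h₁ with ⟨e₁, n₁⟩ | ⟨a, ea, ha, pa, ma⟩
  · rcases h₂ with ⟨e₂, _⟩ | ⟨b, eb, hb, pb, _⟩
    · omega
    · exact absurd pb (n₁ b hb)
  · rcases h₂ with ⟨e₂, n₂⟩ | ⟨b, eb, hb, pb, mb⟩
    · exact absurd pa (n₂ a ha)
    · have := ma b hb pb
      have := mb a ha pa
      omega

theorem take_eq_iff_prefix (t sub : List Char) :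
    t.take sub.length = sub ↔ sub <+: t := by
  rw [List.prefix_iff_eq_take]
  exact eq_comm

theorem altGo_spec (s sub : List Char) (i : Nat) :
    (altGo s sub i = -1 ∧ ∀ j ≤ i, ¬ sub <+: s.drop j) ∨
    (∃ rn : Nat, altGo s sub i = (rn : Int) ∧ rn ≤ i ∧ sub <+: s.drop rn ∧
       ∀ j ≤ i, sub <+: s.drop j → j ≤ rn) := by
  induction i with
  | zero =>
    rw [altGo]
    split
    · rename_i h
      rw [PySem.List.slice_natCast_add] at h
      right
      exact ⟨0, rfl, le_refl 0, (take_eq_iff_prefix _ _).mp h, fun j hj _ => hj⟩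
    · rename_i h
      rw [PySem.List.slice_natCast_add] at h
      left
      refine ⟨rfl, fun j hj => ?_⟩
      interval_cases j
      exact fun hp => h ((take_eq_iff_prefix _ _).mpr hp)
  | succ i' ih =>
    rw [altGo]
    split
    · rename_i h
      rw [PySem.List.slice_natCast_add] at h
      right
      exact ⟨i' + 1, by push_cast; ring, le_refl _, (take_eq_iff_prefix _ _).mp h,
        fun j hj _ => hj⟩
    · rename_i h
      rw [PySem.List.slice_natCast_add] at h
      have hnot : ¬ sub <+: s.drop (i' + 1) := fun hp => h ((take_eq_iff_prefix _ _).mpr hp)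
      rcases ih with ⟨e, hn⟩ | ⟨rn, e, hr, hp, hm⟩
      · left
        refine ⟨e, fun j hj hp => ?_⟩
        rcases Nat.lt_or_ge j (i' + 1) with hj' | hj'
        · exact hn j (by omega) hp
        · have hje : j = i' + 1 := by omega
          rw [hje] at hp
          exact hnot hp
      · right
        refine ⟨rn, e, by omega, hp, fun j hj hpj => ?_⟩
        rcases Nat.lt_or_ge j (i' + 1) with hj' | hj'
        · exact hm j (by omega) hpj
        · have hje : j = i' + 1 := by omega
          rw [hje] at hpj
          exact absurd hpj hnot

-- Python str.find(sub, start) with start = len+1 returns -1 (CPython quirk kept in PySem)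
theorem findFrom_gt_len (s sub : List Char) :
    PySem.Chars.findFrom s sub ((s.length : Int) + 1) none = -1 := by
  simp only [PySem.Chars.findFrom]
  split
  · rename_i h; exact absurd h (by omega)
  · rw [if_pos (by omega)]

theorem findFrom_le_len (s sub : List Char) (k : Nat) (hk : k ≤ s.length) :
    PySem.Chars.findFrom s sub (k : Int) none ≤ (s.length : Int) := by
  rw [PySem.Chars.findFrom_natCast s sub k hk]
  split
  · omega
  · have := PySem.Chars.find_le_length (s.drop k) sub
    simp only [List.length_drop] at this
    omega

theorem prefix_drop_of_drop_add (s sub : List Char) (k j : Nat) (hkj : k ≤ j)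
    (h : sub <+: s.drop j) : sub <+: (s.drop k).drop (j - k) := by
  rw [List.drop_drop]
  have he : k + (j - k) = j := by omega
  rwa [he]

theorem infix_of_prefix_drop {s sub : List Char} {k j : Nat} (hkj : k ≤ j)
    (h : sub <+: s.drop j) : sub <:+: s.drop k :=
  (prefix_drop_of_drop_add s sub k j hkj h).isInfix.trans
    (List.drop_suffix _ _).isInfix

theorem lsiGo_spec (L S : String) :
    ∀ (fuel : Nat) (last : Int),
      -1 ≤ last → last ≤ (L.toList.length : Int) →
      (last = -1 ∨ (0 ≤ last ∧ S.toList <+: L.toList.drop last.toNat)) →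
      (L.toList.length : Int) - last < (fuel : Int) →
      LastOccSpec L.toList S.toList (lsiGo L S last fuel) := by
  intro fuel
  induction fuel with
  | zero => intro last h1 h2 _ h4; exfalso; omega
  | succ fuel ih =>
    intro last h1 h2 hocc h4
    rw [lsiGo]
    simp only [PySem.Str.findFrom_eq]
    set s := L.toList with hs
    set sub := S.toList with hsub
    by_cases hlast : last = (s.length : Int)
    · -- start = n+1 : find returns -1, loop ends with last = n
      rw [hlast, findFrom_gt_len, if_pos rfl]
      rcases hocc with h | ⟨h0, h⟩
      · omega
      · right
        refine ⟨s.length, rfl, le_refl s.length, ?_, fun j hj _ => hj⟩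
        rwa [hlast, Int.toNat_natCast] at h
    · -- start = last+1 ≤ n
      have hk : (last + 1).toNat ≤ s.length := by omega
      have hcast : ((last + 1).toNat : Int) = last + 1 := Int.toNat_of_nonneg (by omega)
      set k := (last + 1).toNat with hkdef
      rw [← hcast]
      by_cases hidx : PySem.Chars.findFrom s sub (k : Int) none = -1
      · rw [hidx]
        have hnone : ¬ sub <:+: s.drop k :=
          (PySem.Chars.findFrom_natCast_eq_neg_one_iff s sub k hk).mp hidx
        rcases hocc with h | ⟨h0, h⟩
        · -- last = -1, k = 0 : no occurrence at all
          left
          refine ⟨h, fun j hj hp => ?_⟩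
          have hk0 : k = 0 := by omega
          exact hnone (by rw [hk0]; exact infix_of_prefix_drop (Nat.zero_le j) hp)
        · -- last ≥ 0 : last is the last occurrence
          right
          refine ⟨last.toNat, (Int.toNat_of_nonneg (by omega)).symm, by omega, h,
            fun j hj hpj => ?_⟩
          by_contra hgt
          push Not at hgt
          exact hnone (infix_of_prefix_drop (by omega) hpj)
      · -- found a further occurrence: recurse
        rw [if_neg hidx]
        obtain ⟨hge, hpref, -⟩ := PySem.Chars.findFrom_natCast_spec s sub k hk hidx
        have hle : PySem.Chars.findFrom s sub (k : Int) none ≤ (s.length : Int) :=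
          findFrom_le_len s sub k hk
        have hge' : (k : Int) ≤ PySem.Chars.findFrom s sub (k : Int) none := hge
        exact ih _ (by omega) hle (Or.inr ⟨by omega, hpref⟩) (by omega)

theorem last_substring_index_py_spec' (L S : String) :
    last_substring_index_py L S = last_substring_index_py_alt L S := by
  have hA : LastOccSpec L.toList S.toList (last_substring_index_py L S) := by
    unfold last_substring_index_py
    exact lsiGo_spec L S _ (-1) (by omega) (by omega) (Or.inl rfl) (by omega)
  have hB : LastOccSpec L.toList S.toList (last_substring_index_py_alt L S) := by
    unfold last_substring_index_py_alt
    dsimp only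
    set s := L.toList with hsdef
    set sub := S.toList with hsubdef
    split
    · rename_i hm
      rcases altGo_spec s sub (s.length - sub.length) with ⟨e, hn⟩ | ⟨rn, e, hr, hp, hmax⟩
      · left
        refine ⟨e, fun j hj hp => ?_⟩
        have hjlen : sub.length ≤ (s.drop j).length := hp.length_le
        simp only [List.length_drop] at hjlen
        exact hn j (by omega) hp
      · right
        refine ⟨rn, e, by omega, hp, fun j hj hpj => ?_⟩
        have hjlen : sub.length ≤ (s.drop j).length := hpj.length_le
        simp only [List.length_drop] at hjlen
        exact hmax j (by omega) hpj
    · rename_i hm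
      left
      refine ⟨rfl, fun j hj hp => ?_⟩
      have hjlen : sub.length ≤ (s.drop j).length := hp.length_le
      simp only [List.length_drop] at hjlen
      omega
  exact lastOccSpec_unique hA hB

-- ===== VERDICT (by name: the statement is the Claim_ definition above) =====
theorem last_substring_index_py_spec : Claim_equal_last_substring_index_py := by
  intro L S _
  exact last_substring_index_py_spec' L S
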